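-- pv_equiv track=rewrite | github.com/Zeeeepa/analyzer | eversale/engine/agent/enterprise_workflows.py | _categorize_events
-- ===== SOURCE A (Python) =====
-- from typing import Dict, List, Any, Optional
--
-- def _categorize_events(events: List[Dict]) -> Dict:
--     """Categorize events by type."""
--     categorized = {
--         "authentication": [],
--         "data_access": [],
--         "configuration": [],
--         "other": []
--     }
--
--     for event in events:
--         event_type = event.get("event_type", "").lower()
--         if "login" in event_type or "auth" in event_type:
--             categorized["authentication"].append(event)
--         elif "access" in event_type or "read" in event_type:
--             categorized["data_access"].append(event)
--         elif "config" in event_type or "setting" in event_type: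
--             categorized["configuration"].append(event)
--         else:
--             categorized["other"].append(event)
--
--     return categorized
-- ===== SOURCE B (Python) =====
-- def _categorize_events(events):
--     """Categorize events by type (staged partition version)."""
--     def split(evts, keywords):
--         hit, miss = [], []
--         for e in evts:
--             et = e.get("event_type", "").lower()
--             (hit if any(kw in et for kw in keywords) else miss).append(e)
--         return hit, miss
--
--     auth, rest = split(events, ("login", "auth"))
--     acc, rest = split(rest, ("access", "read"))
--     conf, other = split(rest, ("config", "setting"))
--     return {
--         "authentication": auth,
--         "data_access": acc,
--         "configuration": conf,
--         "other": other,
--     }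
-- ===== Notes on version B (the rewrite author's own statement) =====
-- stated objective: alternative
-- what changed: Instead of one pass with an if/elif cascade mutating four dict buckets, B makes three staged partition passes: it splits the event list on the authentication keywords, splits the remainder on the data-access keywords, then on the configuration keywords, and builds the result dict once at the end from the four pieces.
import Mathlib
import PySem

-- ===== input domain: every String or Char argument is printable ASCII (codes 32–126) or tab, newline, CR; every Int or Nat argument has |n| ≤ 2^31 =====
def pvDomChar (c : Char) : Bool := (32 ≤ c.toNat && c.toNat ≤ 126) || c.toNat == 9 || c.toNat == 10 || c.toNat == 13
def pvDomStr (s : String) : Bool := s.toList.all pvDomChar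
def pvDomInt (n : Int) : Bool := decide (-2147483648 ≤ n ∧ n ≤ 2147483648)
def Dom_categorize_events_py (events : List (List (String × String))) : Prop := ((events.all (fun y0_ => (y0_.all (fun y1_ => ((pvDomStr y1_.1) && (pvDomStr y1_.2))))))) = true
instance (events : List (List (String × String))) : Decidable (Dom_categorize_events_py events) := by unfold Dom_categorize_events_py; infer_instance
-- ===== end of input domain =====

-- B replaces A's single pass with an if/elif cascade mutating four dict buckets by three
-- staged partition passes over the list, building the result dict once at the end
-- (objective: alternative). Return value only; neither program mutates its argument.

-- ===== PORT A =====
def pvStepA (d : PySem.Dict String (List (List (String × String)))) (event : List (String × String)) :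
    PySem.Dict String (List (List (String × String))) :=
  let event_type := PySem.Str.lower ((PySem.Dict.mk event).getD "event_type" "")
  if PySem.Str.isIn "login" event_type || PySem.Str.isIn "auth" event_type then
    d.modify "authentication" [] (· ++ [event])
  else if PySem.Str.isIn "access" event_type || PySem.Str.isIn "read" event_type then
    d.modify "data_access" [] (· ++ [event])
  else if PySem.Str.isIn "config" event_type || PySem.Str.isIn "setting" event_type then
    d.modify "configuration" [] (· ++ [event])
  else
    d.modify "other" [] (· ++ [event])

def categorize_events_py (events : List (List (String × String))) : List (String × List (List (String × String))) :=
  let categorized : PySem.Dict String (List (List (String × String))) :=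
    ((((PySem.Dict.empty).insert "authentication" []).insert "data_access" []).insert
        "configuration" []).insert "other" []
  (events.foldl pvStepA categorized).items

-- ===== PORT B =====
-- Source B's split: one loop appending each event to hit or miss depending on the keyword test
def pvSplit (evts : List (List (String × String))) (keywords : List String) :
    List (List (String × String)) × List (List (String × String)) :=
  evts.foldl
    (fun s e =>
      let et := PySem.Str.lower ((PySem.Dict.mk e).getD "event_type" "")
      if keywords.any (fun kw => PySem.Str.isIn kw et) then (s.1 ++ [e], s.2)
      else (s.1, s.2 ++ [e]))
    ([], [])

def categorize_events_py_alt (events : List (List (String × String))) : List (String × List (List (String × String))) :=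
  let r1 := pvSplit events ["login", "auth"]
  let r2 := pvSplit r1.2 ["access", "read"]
  let r3 := pvSplit r2.2 ["config", "setting"]
  [("authentication", r1.1), ("data_access", r2.1), ("configuration", r3.1), ("other", r3.2)]

-- ===== PRECONDITION & SPEC =====
def Spec_categorize_events_py (events : List (List (String × String))) (out : List (String × List (List (String × String)))) : Prop := out = categorize_events_py_alt events
instance (events : List (List (String × String))) (out : List (String × List (List (String × String)))) : Decidable (Spec_categorize_events_py events out) := by unfold Spec_categorize_events_py; infer_instance

-- ===== CLAIM (what is proved, stated in full; the proofs are below) =====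
def Claim_equal_categorize_events_py : Prop := ∀ (events : List (List (String × String))), Dom_categorize_events_py events → Spec_categorize_events_py events (categorize_events_py events)

-- ===== LEMMAS AND PROOFS =====

-- the three keyword tests, on an event's lowercased event_type
def pvQ1 (e : List (String × String)) : Bool :=
  let et := PySem.Str.lower ((PySem.Dict.mk e).getD "event_type" "")
  PySem.Str.isIn "login" et || PySem.Str.isIn "auth" et
def pvQ2 (e : List (String × String)) : Bool :=
  let et := PySem.Str.lower ((PySem.Dict.mk e).getD "event_type" "")
  PySem.Str.isIn "access" et || PySem.Str.isIn "read" et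
def pvQ3 (e : List (String × String)) : Bool :=
  let et := PySem.Str.lower ((PySem.Dict.mk e).getD "event_type" "")
  PySem.Str.isIn "config" et || PySem.Str.isIn "setting" et

-- B's split loop is two filters (stated for an abstract predicate)
theorem pv_foldl_partition {α : Type} (p : α → Bool) (l : List α) (a b : List α) :
    l.foldl (fun s e => if p e then (s.1 ++ [e], s.2) else (s.1, s.2 ++ [e])) (a, b) =
    (a ++ l.filter p, b ++ l.filter (fun e => !p e)) := by
  induction l generalizing a b with
  | nil => simp
  | cons e es ih =>
    by_cases h : p e = true <;>
      simp [List.foldl_cons, h, ih, List.filter_cons]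

theorem pvSplit_eq (evts : List (List (String × String))) (kws : List String) :
    pvSplit evts kws =
    (evts.filter (fun e => kws.any (fun kw => PySem.Str.isIn kw (PySem.Str.lower ((PySem.Dict.mk e).getD "event_type" "")))),
     evts.filter (fun e => !kws.any (fun kw => PySem.Str.isIn kw (PySem.Str.lower ((PySem.Dict.mk e).getD "event_type" ""))))) := by
  exact (pv_foldl_partition
    (fun e => kws.any (fun kw => PySem.Str.isIn kw (PySem.Str.lower ((PySem.Dict.mk e).getD "event_type" "")))) evts [] []).trans
    (by simp)

-- A's cascade fold preserves the four-bucket shape (abstract predicates)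
theorem pv_foldl_cascade {α : Type} (q1 q2 q3 : α → Bool) (es : List α) (a b c o : List α) :
    es.foldl
      (fun d e =>
        if q1 e then d.modify "authentication" [] (· ++ [e])
        else if q2 e then d.modify "data_access" [] (· ++ [e])
        else if q3 e then d.modify "configuration" [] (· ++ [e])
        else d.modify "other" [] (· ++ [e]))
      (PySem.Dict.mk [("authentication", a), ("data_access", b), ("configuration", c), ("other", o)]) =
    PySem.Dict.mk
      [("authentication", a ++ es.filter q1),
       ("data_access", b ++ es.filter (fun e => !q1 e && q2 e)),
       ("configuration", c ++ es.filter (fun e => !q1 e && !q2 e && q3 e)),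
       ("other", o ++ es.filter (fun e => !q1 e && !q2 e && !q3 e))] := by
  induction es generalizing a b c o with
  | nil => simp
  | cons e es ih =>
    by_cases h1 : q1 e = true
    · rw [List.foldl_cons]
      have hA :
          (if q1 e then (PySem.Dict.mk [("authentication", a), ("data_access", b), ("configuration", c), ("other", o)]).modify "authentication" [] (· ++ [e])
           else if q2 e then (PySem.Dict.mk [("authentication", a), ("data_access", b), ("configuration", c), ("other", o)]).modify "data_access" [] (· ++ [e])
           else if q3 e then (PySem.Dict.mk [("authentication", a), ("data_access", b), ("configuration", c), ("other", o)]).modify "configuration" [] (· ++ [e])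
           else (PySem.Dict.mk [("authentication", a), ("data_access", b), ("configuration", c), ("other", o)]).modify "other" [] (· ++ [e])) =
          PySem.Dict.mk [("authentication", a ++ [e]), ("data_access", b), ("configuration", c), ("other", o)] := by
        rw [if_pos h1]
        simp [PySem.Dict.modify, PySem.Dict.getD, PySem.Dict.get?, PySem.Dict.insert, PySem.Dict.contains]
      rw [hA, ih]
      simp [List.filter_cons, h1]
    · by_cases h2 : q2 e = true
      · rw [List.foldl_cons]
        have hA :
            (if q1 e then (PySem.Dict.mk [("authentication", a), ("data_access", b), ("configuration", c), ("other", o)]).modify "authentication" [] (· ++ [e])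
             else if q2 e then (PySem.Dict.mk [("authentication", a), ("data_access", b), ("configuration", c), ("other", o)]).modify "data_access" [] (· ++ [e])
             else if q3 e then (PySem.Dict.mk [("authentication", a), ("data_access", b), ("configuration", c), ("other", o)]).modify "configuration" [] (· ++ [e])
             else (PySem.Dict.mk [("authentication", a), ("data_access", b), ("configuration", c), ("other", o)]).modify "other" [] (· ++ [e])) =
            PySem.Dict.mk [("authentication", a), ("data_access", b ++ [e]), ("configuration", c), ("other", o)] := by
          rw [if_neg (by simp [h1]), if_pos h2]
          simp [PySem.Dict.modify, PySem.Dict.getD, PySem.Dict.get?, PySem.Dict.insert, PySem.Dict.contains]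
        rw [hA, ih]
        simp [List.filter_cons, h1, h2]
      · by_cases h3 : q3 e = true
        · rw [List.foldl_cons]
          have hA :
              (if q1 e then (PySem.Dict.mk [("authentication", a), ("data_access", b), ("configuration", c), ("other", o)]).modify "authentication" [] (· ++ [e])
               else if q2 e then (PySem.Dict.mk [("authentication", a), ("data_access", b), ("configuration", c), ("other", o)]).modify "data_access" [] (· ++ [e])
               else if q3 e then (PySem.Dict.mk [("authentication", a), ("data_access", b), ("configuration", c), ("other", o)]).modify "configuration" [] (· ++ [e])
               else (PySem.Dict.mk [("authentication", a), ("data_access", b), ("configuration", c), ("other", o)]).modify "other" [] (· ++ [e])) =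
              PySem.Dict.mk [("authentication", a), ("data_access", b), ("configuration", c ++ [e]), ("other", o)] := by
            rw [if_neg (by simp [h1]), if_neg (by simp [h2]), if_pos h3]
            simp [PySem.Dict.modify, PySem.Dict.getD, PySem.Dict.get?, PySem.Dict.insert, PySem.Dict.contains]
          rw [hA, ih]
          simp [List.filter_cons, h1, h2, h3]
        · rw [List.foldl_cons]
          have hA :
              (if q1 e then (PySem.Dict.mk [("authentication", a), ("data_access", b), ("configuration", c), ("other", o)]).modify "authentication" [] (· ++ [e])
               else if q2 e then (PySem.Dict.mk [("authentication", a), ("data_access", b), ("configuration", c), ("other", o)]).modify "data_access" [] (· ++ [e])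
               else if q3 e then (PySem.Dict.mk [("authentication", a), ("data_access", b), ("configuration", c), ("other", o)]).modify "configuration" [] (· ++ [e])
               else (PySem.Dict.mk [("authentication", a), ("data_access", b), ("configuration", c), ("other", o)]).modify "other" [] (· ++ [e])) =
              PySem.Dict.mk [("authentication", a), ("data_access", b), ("configuration", c), ("other", o ++ [e])] := by
            rw [if_neg (by simp [h1]), if_neg (by simp [h2]), if_neg (by simp [h3])]
            simp [PySem.Dict.modify, PySem.Dict.getD, PySem.Dict.get?, PySem.Dict.insert, PySem.Dict.contains]
          rw [hA, ih]
          simp [List.filter_cons, h1, h2, h3]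

-- pvStepA is the abstract cascade step at pvQ1/pvQ2/pvQ3
theorem pvStepA_eq : pvStepA = fun d e =>
    if pvQ1 e then d.modify "authentication" [] (· ++ [e])
    else if pvQ2 e then d.modify "data_access" [] (· ++ [e])
    else if pvQ3 e then d.modify "configuration" [] (· ++ [e])
    else d.modify "other" [] (· ++ [e]) := rfl

-- ===== VERDICT (by name: the statement is the Claim_ definition above) =====
theorem categorize_events_py_spec : Claim_equal_categorize_events_py := by
  intro events _
  show categorize_events_py events = categorize_events_py_alt events
  have hinit :
      ((((PySem.Dict.empty).insert "authentication" ([] : List (List (String × String)))).insert "data_access" []).insert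
          "configuration" []).insert "other" [] =
      PySem.Dict.mk [("authentication", []), ("data_access", []), ("configuration", []), ("other", [])] := by
    simp [PySem.Dict.empty, PySem.Dict.insert, PySem.Dict.contains]
  simp only [categorize_events_py, categorize_events_py_alt, hinit, pvStepA_eq,
    pv_foldl_cascade, pvSplit_eq, List.filter_filter, PySem.Dict.items]
  simp only [List.nil_append, List.cons.injEq, Prod.mk.injEq, and_true, true_and]
  refine ⟨?_, ?_, ?_, ?_⟩ <;>
    · apply List.filter_congr
      intro e _
      simp only [pvQ1, pvQ2, pvQ3, List.any_cons, List.any_nil, Bool.or_false]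
      all_goals
      cases hk1 : PySem.Str.isIn "login" (PySem.Str.lower ((PySem.Dict.mk e).getD "event_type" "")) <;>
      cases hk2 : PySem.Str.isIn "auth" (PySem.Str.lower ((PySem.Dict.mk e).getD "event_type" "")) <;>
      cases hk3 : PySem.Str.isIn "access" (PySem.Str.lower ((PySem.Dict.mk e).getD "event_type" "")) <;>
      cases hk4 : PySem.Str.isIn "read" (PySem.Str.lower ((PySem.Dict.mk e).getD "event_type" "")) <;>
      cases hk5 : PySem.Str.isIn "config" (PySem.Str.lower ((PySem.Dict.mk e).getD "event_type" "")) <;>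
      cases hk6 : PySem.Str.isIn "setting" (PySem.Str.lower ((PySem.Dict.mk e).getD "event_type" "")) <;>
        simp_all
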